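-- pv_equiv track=rewrite | github.com/boutsen/aoc2023 | day21.py | extend_grid_replace_s
-- ===== SOURCE A (Python) =====
-- def find_s(grid):
--     return next(((i, j) for i, row in enumerate(grid) for j, char in enumerate(row) if char == 'S'), None)
--
-- def find_middle(grid):
--     rows = len(grid)
--     cols = len(grid[0])
--
--     mid_row = rows // 2 if rows % 2 != 0 else rows // 2 - 1
--     mid_col = cols // 2 if cols % 2 != 0 else cols // 2 - 1
--
--     return mid_row, mid_col
--
-- def extend_grid_replace_s(grid, steps):
--     rows = len(grid)
--     cols = len(grid[0])
--
--     middle = find_s(grid)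
--     grid[middle[0]][middle[1]] = '.'  # Replace 'S' with '.' in the original grid
--
--
--     # Create an extended grid with the appropriate size
--     extended_rows = rows * (2 * steps + 1)
--     extended_cols = cols * (2 * steps + 1)
--     extended_grid = [['.' for _ in range(extended_cols)] for _ in range(extended_rows)]
--
--     # Copy the original grid into the center of the extended grid
--     for i in range(rows):
--         for j in range(cols):
--             extended_grid[i + rows * steps][j + cols * steps] = grid[i][j]
--
--     # Copy the original grid to all sides
--     for i in range(rows):
--         for j in range(cols):
--             # Copy to the top side
--             for k in range(steps):
--                 extended_grid[i + k * rows][j + cols * steps] = grid[i][j]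
--             # Copy to the bottom side
--             for k in range(1, steps + 1):
--                 extended_grid[i + k * rows + rows * steps][j + cols * steps] = grid[i][j]
--
--     for i in range(extended_rows):
--         for j in range(cols):
--             # Copy to the left side
--             for k in range(steps):
--                 extended_grid[i][j + k * cols] = extended_grid[i][j + cols * steps]
--             # Copy to the right side
--             for k in range(1, steps + 1):
--                 extended_grid[i][j + k * cols + cols * steps] = extended_grid[i][j + cols * steps]
--
--     middle = find_middle(extended_grid)
--     extended_grid[middle[0]][middle[1]] = 'S'
--
--     return extended_grid
-- ===== SOURCE B (Python) =====
-- # B: build the extended grid in one pass with modular indexing instead of A's three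
-- # staged replication passes. Like A, it mutates the input grid (first 'S' -> '.').
--
-- def find_s(grid):
--     return next(((i, j) for i, row in enumerate(grid) for j, char in enumerate(row) if char == 'S'), None)
--
-- def find_middle(grid):
--     rows = len(grid)
--     cols = len(grid[0])
--
--     mid_row = rows // 2 if rows % 2 != 0 else rows // 2 - 1
--     mid_col = cols // 2 if cols % 2 != 0 else cols // 2 - 1
--
--     return mid_row, mid_col
--
-- def extend_grid_replace_s(grid, steps):
--     rows = len(grid)
--     cols = len(grid[0])
--
--     si, sj = find_s(grid)
--     grid[si][sj] = '.'  # Replace 'S' with '.' in the original grid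
--
--     n = 2 * steps + 1
--     extended_grid = [[grid[i % rows][j % cols] for j in range(cols * n)]
--                      for i in range(rows * n)]
--
--     mi, mj = find_middle(extended_grid)
--     extended_grid[mi][mj] = 'S'
--     return extended_grid
-- ===== Notes on version B (the rewrite author's own statement) =====
-- stated objective: simpler
-- what changed: A's three staged replication passes (blank extended grid, copy center block, tile the center column vertically, then tile every row horizontally by reading the extended grid back) are replaced by one direct comprehension that fills each cell from grid[i % rows][j % cols].
import Mathlib
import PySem

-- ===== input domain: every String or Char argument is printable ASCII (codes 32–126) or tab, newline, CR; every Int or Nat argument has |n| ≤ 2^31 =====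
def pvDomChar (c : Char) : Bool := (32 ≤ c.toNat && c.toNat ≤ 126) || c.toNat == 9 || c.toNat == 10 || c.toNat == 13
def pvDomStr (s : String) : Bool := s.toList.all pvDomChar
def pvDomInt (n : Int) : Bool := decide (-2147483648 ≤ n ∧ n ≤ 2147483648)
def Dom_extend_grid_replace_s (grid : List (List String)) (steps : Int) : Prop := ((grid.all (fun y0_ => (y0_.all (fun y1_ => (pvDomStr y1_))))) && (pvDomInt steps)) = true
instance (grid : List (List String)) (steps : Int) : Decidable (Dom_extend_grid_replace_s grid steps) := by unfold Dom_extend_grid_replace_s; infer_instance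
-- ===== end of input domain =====

-- B builds the extended grid in one pass with modular indexing instead of A's three staged
-- replication passes (objective: simpler). Both Pythons mutate the input grid the same way
-- (first 'S' -> '.'); the equivalence proved here is about the RETURN value.

-- ===== PORT A =====
-- shared helper: Python find_s (first 'S' in row-major order), used verbatim by both Pythons
def pyFindS (grid : List (List String)) : Option (Int × Int) :=
  (PySem.List.enumerate grid 0).findSome? (fun p =>
    ((PySem.List.enumerate p.2 0).find? (fun q => q.2 = "S")).map (fun q => (p.1, q.1)))

-- shared helper: Python find_middle; grid[0] raises on [] (excluded by Pre_), headD [] stands in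
def pyFindMiddle (g : List (List String)) : Int × Int :=
  let rows : Int := g.length
  let cols : Int := (g.headD []).length
  let mid_row := if PySem.Int.mod rows 2 ≠ 0 then PySem.Int.floordiv rows 2 else PySem.Int.floordiv rows 2 - 1
  let mid_col := if PySem.Int.mod cols 2 ≠ 0 then PySem.Int.floordiv cols 2 else PySem.Int.floordiv cols 2 - 1
  (mid_row, mid_col)

-- g[i][j] = v : Python raises IndexError out of range; Pre_ keeps every write in range,
-- where pyGetD/pySetD are Python-exact
def set2 (g : List (List String)) (i j : Int) (v : String) : List (List String) :=
  PySem.List.pySetD g i (PySem.List.pySetD (PySem.List.pyGetD g i []) j v)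

-- g[i][j] read; in range (hence Python-exact) wherever Pre_ admits the input
def get2 (g : List (List String)) (i j : Int) : String :=
  PySem.List.pyGetD (PySem.List.pyGetD g i []) j ""

def extend_grid_replace_s (grid : List (List String)) (steps : Int) : List (List String) :=
  let rows : Int := grid.length
  let cols : Int := (grid.headD []).length   -- len(grid[0]); [] raises, excluded by Pre_
  let middle := (pyFindS grid).getD (0, 0)   -- None subscripted raises TypeError, excluded by Pre_
  let grid := set2 grid middle.1 middle.2 "."
  let extended_rows := rows * (2 * steps + 1)
  let extended_cols := cols * (2 * steps + 1)
  let eg := (PySem.List.pyRange 0 extended_rows 1).map (fun _ =>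
              (PySem.List.pyRange 0 extended_cols 1).map (fun _ => "."))
  -- copy the original grid into the center
  let eg := (PySem.List.pyRange 0 rows 1).foldl (fun eg i =>
              (PySem.List.pyRange 0 cols 1).foldl (fun eg j =>
                set2 eg (i + rows * steps) (j + cols * steps) (get2 grid i j)) eg) eg
  -- copy to top and bottom sides
  let eg := (PySem.List.pyRange 0 rows 1).foldl (fun eg i =>
              (PySem.List.pyRange 0 cols 1).foldl (fun eg j =>
                let eg := (PySem.List.pyRange 0 steps 1).foldl (fun eg k =>
                            set2 eg (i + k * rows) (j + cols * steps) (get2 grid i j)) eg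
                (PySem.List.pyRange 1 (steps + 1) 1).foldl (fun eg k =>
                  set2 eg (i + k * rows + rows * steps) (j + cols * steps) (get2 grid i j)) eg) eg) eg
  -- copy to left and right sides (reads the extended grid's center column block)
  let eg := (PySem.List.pyRange 0 extended_rows 1).foldl (fun eg i =>
              (PySem.List.pyRange 0 cols 1).foldl (fun eg j =>
                let eg := (PySem.List.pyRange 0 steps 1).foldl (fun eg k =>
                            set2 eg i (j + k * cols) (get2 eg i (j + cols * steps))) eg
                (PySem.List.pyRange 1 (steps + 1) 1).foldl (fun eg k =>
                  set2 eg i (j + k * cols + cols * steps) (get2 eg i (j + cols * steps))) eg) eg) eg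
  let middle := pyFindMiddle eg
  set2 eg middle.1 middle.2 "S"

-- ===== PORT B =====
def extend_grid_replace_s_alt (grid : List (List String)) (steps : Int) : List (List String) :=
  let rows : Int := grid.length
  let cols : Int := (grid.headD []).length   -- len(grid[0]); [] raises, excluded by Pre_
  let middle := (pyFindS grid).getD (0, 0)   -- unpacking None raises TypeError, excluded by Pre_
  let grid := set2 grid middle.1 middle.2 "."
  let n := 2 * steps + 1
  let eg := (PySem.List.pyRange 0 (rows * n) 1).map (fun i =>
              (PySem.List.pyRange 0 (cols * n) 1).map (fun j =>
                get2 grid (PySem.Int.mod i rows) (PySem.Int.mod j cols)))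
  let m := pyFindMiddle eg
  set2 eg m.1 m.2 "S"

-- ===== PRECONDITION & SPEC =====
-- Pre_ excludes exactly the inputs where the Python A raises: negative steps (indexing an empty
-- extended grid), an empty grid / empty first row (IndexError), a row shorter than len(grid[0])
-- (IndexError while copying), and a grid without 'S' (subscripting None, TypeError).
def Pre_extend_grid_replace_s (grid : List (List String)) (steps : Int) : Prop :=
  0 ≤ steps ∧ 0 < (grid.headD []).length ∧
  (∀ row ∈ grid, (grid.headD []).length ≤ row.length) ∧ (∃ row ∈ grid, "S" ∈ row)
instance (grid : List (List String)) (steps : Int) : Decidable (Pre_extend_grid_replace_s grid steps) := by unfold Pre_extend_grid_replace_s; infer_instance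

def pvWitness_extend_grid_replace_s : List (List String) × Int := ([["S"]], 0)

def Spec_extend_grid_replace_s (grid : List (List String)) (steps : Int) (out : List (List String)) : Prop := out = extend_grid_replace_s_alt grid steps
instance (grid : List (List String)) (steps : Int) (out : List (List String)) : Decidable (Spec_extend_grid_replace_s grid steps out) := by unfold Spec_extend_grid_replace_s; infer_instance

-- ===== CLAIM (what is proved, stated in full; the proofs are below) =====
def Claim_equal_extend_grid_replace_s : Prop := ∀ (grid : List (List String)) (steps : Int), Dom_extend_grid_replace_s grid steps → Pre_extend_grid_replace_s grid steps → Spec_extend_grid_replace_s grid steps (extend_grid_replace_s grid steps)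

-- ===== LEMMAS AND PROOFS =====

def Shape (g : List (List String)) (er ec : Nat) : Prop :=
  g.length = er ∧ ∀ row ∈ g, row.length = ec

lemma get2_of_nonneg (g : List (List String)) (i j : Int) (hi : 0 ≤ i) (hj : 0 ≤ j) :
    get2 g i j = (g.getD i.toNat []).getD j.toNat "" := by
  unfold get2
  rw [show i = ((i.toNat : Nat) : Int) by omega, show j = ((j.toNat : Nat) : Int) by omega]
  simp only [PySem.List.pyGetD_natCast]
  simp only [List.getD_eq_getElem?_getD]
  norm_num
  rw [show (max i 0).toNat = i.toNat from by omega, show (max j 0).toNat = j.toNat from by omega]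

lemma set2_of_nonneg (g : List (List String)) (i j : Int) (v : String) (hi : 0 ≤ i) (hj : 0 ≤ j) :
    set2 g i j v = g.set i.toNat ((g.getD i.toNat []).set j.toNat v) := by
  unfold set2
  rw [show i = ((i.toNat : Nat) : Int) by omega, show j = ((j.toNat : Nat) : Int) by omega]
  simp only [PySem.List.pySetD_natCast, PySem.List.pyGetD_natCast]
  simp only [List.getD_eq_getElem?_getD]
  norm_num
  rw [show (max i 0).toNat = i.toNat from by omega, show (max j 0).toNat = j.toNat from by omega]

lemma getD_set_eq {α : Type} (l : List α) (n m : Nat) (a : α) (d : α) :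
    (l.set n a).getD m d = if m = n ∧ n < l.length then a else l.getD m d := by
  simp [List.getD_eq_getElem?_getD, List.getElem?_set]
  split <;> split <;> simp_all

lemma Shape_set2 (g : List (List String)) (er ec : Nat) (i j : Int) (v : String)
    (hi : 0 ≤ i) (hj : 0 ≤ j) (hs : Shape g er ec) :
    Shape (set2 g i j v) er ec := by
  rw [set2_of_nonneg g i j v hi hj]
  obtain ⟨hlen, hrow⟩ := hs
  by_cases hlt : i.toNat < g.length
  · refine ⟨by simpa using hlen, ?_⟩
    intro row hr
    rcases List.mem_or_eq_of_mem_set hr with h | h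
    · exact hrow _ h
    · subst h
      rw [List.length_set, List.getD_eq_getElem _ _ hlt]
      exact hrow _ (List.getElem_mem hlt)
  · rw [List.set_eq_of_length_le (by omega)]
    exact ⟨hlen, hrow⟩

lemma get2_set2 (g : List (List String)) (er ec : Nat) (a b : Int) (v : String)
    (hs : Shape g er ec)
    (ha : 0 ≤ a) (ha2 : a < (er : Int)) (hb : 0 ≤ b) (hb2 : b < (ec : Int))
    (i j : Int) (hi : 0 ≤ i) (hj : 0 ≤ j) :
    get2 (set2 g a b v) i j = if i = a ∧ j = b then v else get2 g i j := by
  obtain ⟨hlen, hrow⟩ := hs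
  rw [set2_of_nonneg g a b v ha hb, get2_of_nonneg _ i j hi hj, get2_of_nonneg g i j hi hj]
  rw [getD_set_eq]
  have hato : a.toNat < g.length := by omega
  have hrl : (g.getD a.toNat []).length = ec := by
    rw [List.getD_eq_getElem _ _ hato]; exact hrow _ (List.getElem_mem hato)
  by_cases hia : i.toNat = a.toNat
  · rw [if_pos ⟨hia, hato⟩, getD_set_eq, hrl]
    by_cases hjb : j.toNat = b.toNat
    · rw [if_pos ⟨hjb, by omega⟩, if_pos ⟨by omega, by omega⟩]
    · rw [if_neg (by omega), if_neg (by omega), hia]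
  · rw [if_neg (by omega), if_neg (by omega)]

def InB (er ec : Nat) (p : Int × Int) : Prop :=
  0 ≤ p.1 ∧ p.1 < (er : Int) ∧ 0 ≤ p.2 ∧ p.2 < (ec : Int)

-- a sequence of writes whose values are determined consistently by the position
lemma foldl_writes (er ec : Nat) (l : List ((Int × Int) × String)) :
    ∀ g : List (List String), Shape g er ec →
    (∀ p ∈ l, InB er ec p.1) →
    (∀ p ∈ l, ∀ q ∈ l, p.1 = q.1 → p.2 = q.2) →
    Shape (l.foldl (fun g p => set2 g p.1.1 p.1.2 p.2) g) er ec ∧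
    (∀ p ∈ l, get2 (l.foldl (fun g p => set2 g p.1.1 p.1.2 p.2) g) p.1.1 p.1.2 = p.2) ∧
    (∀ i j : Int, 0 ≤ i → 0 ≤ j → (∀ p ∈ l, p.1 ≠ (i, j)) →
      get2 (l.foldl (fun g p => set2 g p.1.1 p.1.2 p.2) g) i j = get2 g i j) := by
  induction l with
  | nil => intro g hs _ _; exact ⟨hs, by simp, by simp⟩
  | cons p rest ih =>
    intro g hs hb hcons
    obtain ⟨hp1, hp2, hp3, hp4⟩ := hb p (by simp)
    have hs' : Shape (set2 g p.1.1 p.1.2 p.2) er ec := Shape_set2 _ _ _ _ _ _ hp1 hp3 hs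
    obtain ⟨ihS, ihA, ihB⟩ := ih (set2 g p.1.1 p.1.2 p.2) hs'
      (fun q hq => hb q (by simp [hq]))
      (fun q hq r hr => hcons q (by simp [hq]) r (by simp [hr]))
    simp only [List.foldl_cons]
    refine ⟨ihS, ?_, ?_⟩
    · intro q hq
      rcases List.mem_cons.1 hq with rfl | hq'
      · by_cases hmem : ∃ r ∈ rest, r.1 = q.1
        · obtain ⟨r, hr, hr1⟩ := hmem
          have : get2 (rest.foldl _ _) r.1.1 r.1.2 = r.2 := ihA r hr
          rw [hr1] at this
          rw [this]
          exact (hcons r (by simp [hr]) q (by simp) hr1).symm ▸ rfl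
        · push Not at hmem
          rw [ihB q.1.1 q.1.2 hp1 hp3 (fun r hr => by
            intro hcon; exact hmem r hr (by rw [hcon]))]
          rw [get2_set2 g er ec _ _ _ hs hp1 hp2 hp3 hp4 _ _ hp1 hp3]
          simp
      · exact ihA q hq'
    · intro i j hi hj hne
      rw [ihB i j hi hj (fun r hr => hne r (by simp [hr]))]
      rw [get2_set2 g er ec _ _ _ hs hp1 hp2 hp3 hp4 _ _ hi hj]
      rw [if_neg (by
        intro ⟨h1, h2⟩
        exact hne p (by simp) (by rw [Prod.ext_iff]; exact ⟨h1.symm, h2.symm⟩)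
      )]

-- a sequence of writes each of which copies the current value at a read position that is
-- never itself written during the sequence
lemma foldl_reads (er ec : Nat) (l : List ((Int × Int) × (Int × Int))) :
    ∀ g : List (List String), Shape g er ec →
    (∀ p ∈ l, InB er ec p.1 ∧ InB er ec p.2) →
    (∀ p ∈ l, ∀ q ∈ l, p.2 ≠ q.1) →
    (∀ p ∈ l, ∀ q ∈ l, p.1 = q.1 → get2 g p.2.1 p.2.2 = get2 g q.2.1 q.2.2) →
    Shape (l.foldl (fun g p => set2 g p.1.1 p.1.2 (get2 g p.2.1 p.2.2)) g) er ec ∧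
    (∀ p ∈ l, get2 (l.foldl (fun g p => set2 g p.1.1 p.1.2 (get2 g p.2.1 p.2.2)) g) p.1.1 p.1.2
        = get2 g p.2.1 p.2.2) ∧
    (∀ i j : Int, 0 ≤ i → 0 ≤ j → (∀ p ∈ l, p.1 ≠ (i, j)) →
      get2 (l.foldl (fun g p => set2 g p.1.1 p.1.2 (get2 g p.2.1 p.2.2)) g) i j = get2 g i j) := by
  induction l with
  | nil => intro g hs _ _ _; exact ⟨hs, by simp, by simp⟩
  | cons p rest ih =>
    intro g hs hb hdisj hcons
    obtain ⟨⟨hp1, hp2, hp3, hp4⟩, hr1, hr2, hr3, hr4⟩ := hb p (by simp)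
    set g' := set2 g p.1.1 p.1.2 (get2 g p.2.1 p.2.2) with hg'
    have hs' : Shape g' er ec := Shape_set2 _ _ _ _ _ _ hp1 hp3 hs
    -- reads are unchanged by the head write
    have hread : ∀ q ∈ (p :: rest), get2 g' q.2.1 q.2.2 = get2 g q.2.1 q.2.2 := by
      intro q hq
      rw [hg', get2_set2 g er ec _ _ _ hs hp1 hp2 hp3 hp4 _ _ (hb q hq).2.1 (hb q hq).2.2.2.1]
      rw [if_neg (by
        intro ⟨h1, h2⟩
        exact hdisj q hq p (by simp) (by rw [Prod.ext_iff]; exact ⟨h1, h2⟩))]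
    obtain ⟨ihS, ihA, ihB⟩ := ih g' hs'
      (fun q hq => hb q (by simp [hq]))
      (fun q hq r hr => hdisj q (by simp [hq]) r (by simp [hr]))
      (fun q hq r hr h1 => by
        rw [hread q (by simp [hq]), hread r (by simp [hr])]
        exact hcons q (by simp [hq]) r (by simp [hr]) h1)
    simp only [List.foldl_cons]
    refine ⟨ihS, ?_, ?_⟩
    · intro q hq
      rcases List.mem_cons.1 hq with rfl | hq'
      · by_cases hmem : ∃ r ∈ rest, r.1 = q.1
        · obtain ⟨r, hr, hrq⟩ := hmem
          have h := ihA r hr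
          rw [hrq] at h
          rw [h, hread r (by simp [hr])]
          exact hcons r (by simp [hr]) q (by simp) hrq
        · push Not at hmem
          rw [ihB q.1.1 q.1.2 hp1 hp3 (fun r hr => by
            intro hcon; exact hmem r hr (by rw [hcon]))]
          rw [hg', get2_set2 g er ec _ _ _ hs hp1 hp2 hp3 hp4 _ _ hp1 hp3]
          simp
      · rw [ihA q hq', hread q (by simp [hq'])]
    · intro i j hi hj hne
      rw [ihB i j hi hj (fun r hr => hne r (by simp [hr]))]
      rw [hg', get2_set2 g er ec _ _ _ hs hp1 hp2 hp3 hp4 _ _ hi hj]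
      rw [if_neg (by
        intro ⟨h1, h2⟩
        exact hne p (by simp) (by rw [Prod.ext_iff]; exact ⟨h1.symm, h2.symm⟩))]

lemma grid_ext (g h : List (List String)) (er ec : Nat)
    (hg : Shape g er ec) (hh : Shape h er ec)
    (heq : ∀ i j : Int, 0 ≤ i → i < (er : Int) → 0 ≤ j → j < (ec : Int) → get2 g i j = get2 h i j) :
    g = h := by
  apply List.ext_getElem (by rw [hg.1, hh.1])
  intro n h1 h2
  apply List.ext_getElem
  · rw [hg.2 _ (List.getElem_mem h1), hh.2 _ (List.getElem_mem h2)]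
  · intro m hm1 hm2
    have hn : n < er := by rw [← hg.1]; exact h1
    have hm : m < ec := by rw [← hg.2 _ (List.getElem_mem h1)]; exact hm1
    have := heq n m (by positivity) (by exact_mod_cast hn) (by positivity) (by exact_mod_cast hm)
    rw [get2_of_nonneg _ _ _ (by positivity) (by positivity)] at this
    rw [get2_of_nonneg _ _ _ (by positivity) (by positivity)] at this
    simp only [Int.toNat_natCast] at this
    rw [List.getD_eq_getElem _ _ h1, List.getD_eq_getElem _ _ h2] at this
    rwa [List.getD_eq_getElem _ _ hm1, List.getD_eq_getElem _ _ hm2] at this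

lemma shape_map_grid (f : Int → Int → String) (er ec : Int) :
    Shape ((PySem.List.pyRange 0 er 1).map (fun i => (PySem.List.pyRange 0 ec 1).map (f i)))
      er.toNat ec.toNat := by
  constructor
  · simp [PySem.List.length_pyRange_one]
  · intro row hrow
    simp only [List.mem_map] at hrow
    obtain ⟨i, _, rfl⟩ := hrow
    simp [PySem.List.length_pyRange_one]

lemma get2_map_grid (f : Int → Int → String) (er ec : Int) (i j : Int)
    (hi : 0 ≤ i) (hi2 : i < er) (hj : 0 ≤ j) (hj2 : j < ec) :
    get2 ((PySem.List.pyRange 0 er 1).map (fun i => (PySem.List.pyRange 0 ec 1).map (f i))) i j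
      = f i j := by
  unfold get2
  rw [show ((PySem.List.pyRange 0 er 1).map (fun i => (PySem.List.pyRange 0 ec 1).map (f i)))
      = ((PySem.List.pyRange 0 er 1).map (fun i => (PySem.List.pyRange 0 ec 1).map (f i))) from rfl]
  rw [PySem.List.pyGetD_map_pyRange_of_nonneg _ er i _ hi hi2]
  rw [PySem.List.pyGetD_map_pyRange_of_nonneg _ ec j _ hj hj2]

lemma row_decomp (R : Nat) (hR : 0 < R) (n : Int) (i : Int) (_hn : 0 ≤ n)
    (hi : 0 ≤ i) (hi2 : i < (R : Int) * n) :
    ∃ i0 k : Int, 0 ≤ i0 ∧ i0 < (R : Int) ∧ 0 ≤ k ∧ k < n ∧ i = i0 + k * (R : Int)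
      ∧ i0 = i % (R : Int) ∧ k = i / (R : Int) := by
  have hR' : (0 : Int) < (R : Int) := by exact_mod_cast hR
  refine ⟨i % (R : Int), i / (R : Int), Int.emod_nonneg i (by omega), Int.emod_lt_of_pos i hR',
    (Int.ediv_nonneg_iff_of_pos hR').mpr hi, ?_, ?_, rfl, rfl⟩
  · rw [Int.ediv_lt_iff_lt_mul hR']
    calc i < (R : Int) * n := hi2
    _ = n * (R : Int) := by ring
  · have := Int.mul_ediv_add_emod i (R : Int)
    linarith

lemma mod_add_mul (R : Nat) (i0 k : Int) (h : 0 ≤ i0) (h2 : i0 < (R : Int)) :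
    (i0 + k * (R : Int)) % (R : Int) = i0 := by
  rw [Int.add_mul_emod_self_right]
  exact Int.emod_eq_of_lt h h2

lemma pass1_spec (g' eg : List (List String)) (R C : Nat) (s : Int)
    (hR : 0 < R) (hC : 0 < C) (hs0 : 0 ≤ s)
    (hshape : Shape eg ((R : Int) * (2 * s + 1)).toNat ((C : Int) * (2 * s + 1)).toNat) :
    Shape ((PySem.List.pyRange 0 (R : Int) 1).foldl (fun eg i =>
        (PySem.List.pyRange 0 (C : Int) 1).foldl (fun eg j =>
          set2 eg (i + (R : Int) * s) (j + (C : Int) * s) (get2 g' i j)) eg) eg)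
      ((R : Int) * (2 * s + 1)).toNat ((C : Int) * (2 * s + 1)).toNat ∧
    ∀ i j : Int, 0 ≤ i → 0 ≤ j →
      get2 ((PySem.List.pyRange 0 (R : Int) 1).foldl (fun eg i =>
        (PySem.List.pyRange 0 (C : Int) 1).foldl (fun eg j =>
          set2 eg (i + (R : Int) * s) (j + (C : Int) * s) (get2 g' i j)) eg) eg) i j =
      if (R : Int) * s ≤ i ∧ i < (R : Int) * s + R ∧ (C : Int) * s ≤ j ∧ j < (C : Int) * s + C
      then get2 g' (i - (R : Int) * s) (j - (C : Int) * s) else get2 eg i j := by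
  have hRs : (0 : Int) ≤ (R : Int) * s := by positivity
  have hCs : (0 : Int) ≤ (C : Int) * s := by positivity
  have hERv : (R : Int) * (2 * s + 1) = 2 * ((R : Int) * s) + R := by ring
  have hECv : (C : Int) * (2 * s + 1) = 2 * ((C : Int) * s) + C := by ring
  have hER : ((((R : Int) * (2 * s + 1)).toNat : Nat) : Int) = (R : Int) * (2 * s + 1) :=
    Int.toNat_of_nonneg (by positivity)
  have hEC : ((((C : Int) * (2 * s + 1)).toNat : Nat) : Int) = (C : Int) * (2 * s + 1) :=
    Int.toNat_of_nonneg (by positivity)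
  have hfold : ((PySem.List.pyRange 0 (R : Int) 1).foldl (fun eg i =>
        (PySem.List.pyRange 0 (C : Int) 1).foldl (fun eg j =>
          set2 eg (i + (R : Int) * s) (j + (C : Int) * s) (get2 g' i j)) eg) eg)
      = ((PySem.List.pyRange 0 (R : Int) 1).flatMap (fun i =>
          (PySem.List.pyRange 0 (C : Int) 1).map (fun j =>
            (((i + (R : Int) * s, j + (C : Int) * s) : Int × Int), get2 g' i j)))).foldl
          (fun g p => set2 g p.1.1 p.1.2 p.2) eg := by
    rw [List.foldl_flatMap]
    simp [List.foldl_map]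
  have hmem : ∀ p ∈ ((PySem.List.pyRange 0 (R : Int) 1).flatMap (fun i =>
          (PySem.List.pyRange 0 (C : Int) 1).map (fun j =>
            (((i + (R : Int) * s, j + (C : Int) * s) : Int × Int), get2 g' i j)))),
      ∃ i0 j0 : Int, 0 ≤ i0 ∧ i0 < R ∧ 0 ≤ j0 ∧ j0 < C ∧
        p = ((i0 + (R : Int) * s, j0 + (C : Int) * s), get2 g' i0 j0) := by
    intro p hp
    simp only [List.mem_flatMap, List.mem_map, PySem.List.mem_pyRange_one] at hp
    obtain ⟨i0, ⟨hi1, hi2⟩, j0, ⟨hj1, hj2⟩, rfl⟩ := hp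
    exact ⟨i0, j0, hi1, hi2, hj1, hj2, rfl⟩
  obtain ⟨hS, hA, hB⟩ := foldl_writes ((R : Int) * (2 * s + 1)).toNat ((C : Int) * (2 * s + 1)).toNat
    _ eg hshape
    (by
      intro p hp
      obtain ⟨i0, j0, h1, h2, h3, h4, rfl⟩ := hmem p hp
      exact ⟨by linarith, by rw [hER]; linarith, by linarith, by rw [hEC]; linarith⟩)
    (by
      intro p hp q hq hpq
      obtain ⟨i0, j0, h1, h2, h3, h4, rfl⟩ := hmem p hp
      obtain ⟨i0', j0', h1', h2', h3', h4', rfl⟩ := hmem q hq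
      simp only [Prod.mk.injEq] at hpq ⊢
      have : i0 = i0' := by linarith [hpq.1]
      have : j0 = j0' := by linarith [hpq.2]
      subst_vars; rfl)
  rw [hfold]
  refine ⟨hS, ?_⟩
  intro i j hi hj
  split_ifs with hcond
  · have hmem' : (((i, j) : Int × Int), get2 g' (i - (R : Int) * s) (j - (C : Int) * s)) ∈
        ((PySem.List.pyRange 0 (R : Int) 1).flatMap (fun i =>
          (PySem.List.pyRange 0 (C : Int) 1).map (fun j =>
            (((i + (R : Int) * s, j + (C : Int) * s) : Int × Int), get2 g' i j)))) := by
      simp only [List.mem_flatMap, List.mem_map, PySem.List.mem_pyRange_one]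
      refine ⟨i - (R : Int) * s, ⟨by linarith [hcond.1], by linarith [hcond.2.1]⟩,
        j - (C : Int) * s, ⟨by linarith [hcond.2.2.1], by linarith [hcond.2.2.2]⟩, ?_⟩
      simp only [Prod.mk.injEq]
      exact ⟨⟨by ring, by ring⟩, trivial⟩
    exact hA _ hmem'
  · apply hB i j hi hj
    intro p hp
    obtain ⟨i0, j0, h1, h2, h3, h4, rfl⟩ := hmem p hp
    intro hcon
    simp only [Prod.mk.injEq] at hcon
    exact hcond ⟨by linarith [hcon.1.symm], by linarith [hcon.1], by linarith [hcon.2.symm],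
      by linarith [hcon.2]⟩

lemma pass2_spec (g' eg : List (List String)) (R C : Nat) (s : Int)
    (hR : 0 < R) (hC : 0 < C) (hs0 : 0 ≤ s)
    (hshape : Shape eg ((R : Int) * (2 * s + 1)).toNat ((C : Int) * (2 * s + 1)).toNat) :
    Shape ((PySem.List.pyRange 0 (R : Int) 1).foldl (fun eg i =>
        (PySem.List.pyRange 0 (C : Int) 1).foldl (fun eg j =>
          (PySem.List.pyRange 1 (s + 1) 1).foldl (fun eg k =>
            set2 eg (i + k * (R : Int) + (R : Int) * s) (j + (C : Int) * s) (get2 g' i j))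
            ((PySem.List.pyRange 0 s 1).foldl (fun eg k =>
              set2 eg (i + k * (R : Int)) (j + (C : Int) * s) (get2 g' i j)) eg)) eg) eg)
      ((R : Int) * (2 * s + 1)).toNat ((C : Int) * (2 * s + 1)).toNat ∧
    ∀ i j : Int, 0 ≤ i → i < (R : Int) * (2 * s + 1) → 0 ≤ j →
      get2 ((PySem.List.pyRange 0 (R : Int) 1).foldl (fun eg i =>
        (PySem.List.pyRange 0 (C : Int) 1).foldl (fun eg j =>
          (PySem.List.pyRange 1 (s + 1) 1).foldl (fun eg k =>
            set2 eg (i + k * (R : Int) + (R : Int) * s) (j + (C : Int) * s) (get2 g' i j))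
            ((PySem.List.pyRange 0 s 1).foldl (fun eg k =>
              set2 eg (i + k * (R : Int)) (j + (C : Int) * s) (get2 g' i j)) eg)) eg) eg) i j =
      if ((C : Int) * s ≤ j ∧ j < (C : Int) * s + C) ∧ (i < (R : Int) * s ∨ (R : Int) * s + R ≤ i)
      then get2 g' (i % (R : Int)) (j - (C : Int) * s) else get2 eg i j := by
  have hR' : (0 : Int) < (R : Int) := by exact_mod_cast hR
  have hRs : (0 : Int) ≤ (R : Int) * s := by positivity
  have hCs : (0 : Int) ≤ (C : Int) * s := by positivity
  have hER : ((((R : Int) * (2 * s + 1)).toNat : Nat) : Int) = (R : Int) * (2 * s + 1) :=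
    Int.toNat_of_nonneg (by positivity)
  have hEC : ((((C : Int) * (2 * s + 1)).toNat : Nat) : Int) = (C : Int) * (2 * s + 1) :=
    Int.toNat_of_nonneg (by positivity)
  have hERv : (R : Int) * (2 * s + 1) = 2 * ((R : Int) * s) + R := by ring
  have hECv : (C : Int) * (2 * s + 1) = 2 * ((C : Int) * s) + C := by ring
  set L2 := (PySem.List.pyRange 0 (R : Int) 1).flatMap (fun i =>
      (PySem.List.pyRange 0 (C : Int) 1).flatMap (fun j =>
        (PySem.List.pyRange 0 s 1).map (fun k =>
          (((i + k * (R : Int), j + (C : Int) * s) : Int × Int), get2 g' i j)) ++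
        (PySem.List.pyRange 1 (s + 1) 1).map (fun k =>
          (((i + k * (R : Int) + (R : Int) * s, j + (C : Int) * s) : Int × Int), get2 g' i j))))
    with hL2
  have hfold : (PySem.List.pyRange 0 (R : Int) 1).foldl (fun eg i =>
        (PySem.List.pyRange 0 (C : Int) 1).foldl (fun eg j =>
          (PySem.List.pyRange 1 (s + 1) 1).foldl (fun eg k =>
            set2 eg (i + k * (R : Int) + (R : Int) * s) (j + (C : Int) * s) (get2 g' i j))
            ((PySem.List.pyRange 0 s 1).foldl (fun eg k =>
              set2 eg (i + k * (R : Int)) (j + (C : Int) * s) (get2 g' i j)) eg)) eg) eg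
      = L2.foldl (fun g p => set2 g p.1.1 p.1.2 p.2) eg := by
    rw [hL2]
    simp [List.foldl_flatMap, List.foldl_append, List.foldl_map]
  -- characterize rows of write positions: row r determines i0 = r % R, and the write value
  have hmem : ∀ p ∈ L2, ∃ i0 j0 k : Int, 0 ≤ i0 ∧ i0 < R ∧ 0 ≤ j0 ∧ j0 < C ∧
      ((0 ≤ k ∧ k < s ∧ p = ((i0 + k * (R : Int), j0 + (C : Int) * s), get2 g' i0 j0)) ∨
       (1 ≤ k ∧ k < s + 1 ∧
         p = ((i0 + k * (R : Int) + (R : Int) * s, j0 + (C : Int) * s), get2 g' i0 j0))) := by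
    intro p hp
    rw [hL2] at hp
    simp only [List.mem_flatMap, List.mem_append, List.mem_map, PySem.List.mem_pyRange_one] at hp
    obtain ⟨i0, ⟨hi1, hi2⟩, j0, ⟨hj1, hj2⟩, hp⟩ := hp
    rcases hp with ⟨k, ⟨hk1, hk2⟩, rfl⟩ | ⟨k, ⟨hk1, hk2⟩, rfl⟩
    · exact ⟨i0, j0, k, hi1, hi2, hj1, hj2, Or.inl ⟨hk1, hk2, rfl⟩⟩
    · exact ⟨i0, j0, k, hi1, hi2, hj1, hj2, Or.inr ⟨hk1, hk2, rfl⟩⟩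
  -- every write's value is determined by its position
  have hkey : ∀ p ∈ L2, p.2 = get2 g' (p.1.1 % (R : Int)) (p.1.2 - (C : Int) * s) := by
    intro p hp
    obtain ⟨i0, j0, k, h1, h2, h3, h4, hc⟩ := hmem p hp
    rcases hc with ⟨hk1, hk2, rfl⟩ | ⟨hk1, hk2, rfl⟩
    · simp only
      rw [mod_add_mul R i0 k h1 h2]
      congr 1; ring
    · simp only
      rw [show i0 + k * (R : Int) + (R : Int) * s = i0 + (k + s) * (R : Int) from by ring,
        mod_add_mul R i0 (k + s) h1 h2]
      congr 1; ring
  obtain ⟨hS, hA, hB⟩ := foldl_writes ((R : Int) * (2 * s + 1)).toNat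
    ((C : Int) * (2 * s + 1)).toNat L2 eg hshape
    (by
      intro p hp
      obtain ⟨i0, j0, k, h1, h2, h3, h4, hc⟩ := hmem p hp
      rcases hc with ⟨hk1, hk2, rfl⟩ | ⟨hk1, hk2, rfl⟩
      · have hkR1 : 0 ≤ k * (R : Int) := by positivity
        have hkR2 : k * (R : Int) ≤ (s - 1) * (R : Int) :=
          mul_le_mul_of_nonneg_right (by linarith) (by positivity)
        have : (s - 1) * (R : Int) = (R : Int) * s - R := by ring
        exact ⟨by linarith, by rw [hER]; linarith, by linarith, by rw [hEC]; linarith⟩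
      · have hkR1 : 0 ≤ k * (R : Int) := by positivity
        have hkR2 : k * (R : Int) ≤ s * (R : Int) :=
          mul_le_mul_of_nonneg_right (by linarith) (by positivity)
        have : s * (R : Int) = (R : Int) * s := by ring
        exact ⟨by linarith, by rw [hER]; linarith, by linarith, by rw [hEC]; linarith⟩)
    (by
      intro p hp q hq hpq
      rw [hkey p hp, hkey q hq, show p.1.1 = q.1.1 from by rw [hpq],
        show p.1.2 = q.1.2 from by rw [hpq]])
  rw [hfold]
  refine ⟨hS, ?_⟩
  intro i j hi hi2 hj
  split_ifs with hcond
  · obtain ⟨⟨hj1, hj2⟩, hrows⟩ := hcond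
    rcases hrows with hlt | hge
    · -- top block: i < R*s
      obtain ⟨i0, k, h1, h2, h3, h4, h5, h6, -⟩ := row_decomp R hR s i hs0 hi hlt
      have hmem' : (((i, j) : Int × Int), get2 g' (i % (R : Int)) (j - (C : Int) * s)) ∈ L2 := by
        rw [hL2]
        simp only [List.mem_flatMap, List.mem_append, List.mem_map, PySem.List.mem_pyRange_one]
        refine ⟨i0, ⟨h1, h2⟩, j - (C : Int) * s, ⟨by linarith, by linarith⟩,
          Or.inl ⟨k, ⟨h3, h4⟩, ?_⟩⟩
        simp only [Prod.mk.injEq]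
        refine ⟨⟨by linarith, by ring⟩, ?_⟩
        rw [← h6]
      exact hA _ hmem'
    · -- bottom block: R*s + R ≤ i
      have hi' : 0 ≤ i - (R : Int) * s := by linarith
      have hi'2 : i - (R : Int) * s < (R : Int) * (s + 1) := by
        have : (R : Int) * (s + 1) = (R : Int) * (2 * s + 1) - (R : Int) * s := by ring
        linarith
      obtain ⟨i0, k, h1, h2, h3, h4, h5, h6, -⟩ :=
        row_decomp R hR (s + 1) (i - (R : Int) * s) (by linarith) hi' hi'2
      have hk1 : 1 ≤ k := by
        by_contra hcon
        have hk0 : k ≤ 0 := by omega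
        have : k * (R : Int) ≤ 0 := mul_nonpos_of_nonpos_of_nonneg hk0 (by positivity)
        linarith
      have himod : i % (R : Int) = i0 := by
        rw [show i = i0 + (k + s) * (R : Int) from by linarith [h5]; ]
        exact mod_add_mul R i0 (k + s) h1 h2
      have hmem' : (((i, j) : Int × Int), get2 g' (i % (R : Int)) (j - (C : Int) * s)) ∈ L2 := by
        rw [hL2]
        simp only [List.mem_flatMap, List.mem_append, List.mem_map, PySem.List.mem_pyRange_one]
        refine ⟨i0, ⟨h1, h2⟩, j - (C : Int) * s, ⟨by linarith, by linarith⟩,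
          Or.inr ⟨k, ⟨hk1, h4⟩, ?_⟩⟩
        simp only [Prod.mk.injEq]
        refine ⟨⟨by linarith, by ring⟩, ?_⟩
        rw [himod]
      exact hA _ hmem'
  · apply hB i j hi hj
    intro p hp
    obtain ⟨i0, j0, k, h1, h2, h3, h4, hc⟩ := hmem p hp
    intro hcon
    apply hcond
    rcases hc with ⟨hk1, hk2, rfl⟩ | ⟨hk1, hk2, rfl⟩ <;> simp only [Prod.mk.injEq] at hcon
    · have hkR1 : 0 ≤ k * (R : Int) := by positivity
      have hkR2 : k * (R : Int) ≤ (s - 1) * (R : Int) :=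
        mul_le_mul_of_nonneg_right (by linarith) (by positivity)
      have : (s - 1) * (R : Int) = (R : Int) * s - R := by ring
      exact ⟨⟨by linarith [hcon.2], by linarith [hcon.2]⟩, Or.inl (by linarith [hcon.1])⟩
    · have hkR2 : (1 : Int) * (R : Int) ≤ k * (R : Int) :=
        mul_le_mul_of_nonneg_right (by linarith) (by positivity)
      exact ⟨⟨by linarith [hcon.2], by linarith [hcon.2]⟩, Or.inr (by linarith [hcon.1])⟩

lemma pass3_spec (eg : List (List String)) (R C : Nat) (s : Int)
    (hR : 0 < R) (hC : 0 < C) (hs0 : 0 ≤ s)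
    (hshape : Shape eg ((R : Int) * (2 * s + 1)).toNat ((C : Int) * (2 * s + 1)).toNat) :
    Shape ((PySem.List.pyRange 0 ((R : Int) * (2 * s + 1)) 1).foldl (fun eg i =>
        (PySem.List.pyRange 0 (C : Int) 1).foldl (fun eg j =>
          (PySem.List.pyRange 1 (s + 1) 1).foldl (fun eg k =>
            set2 eg i (j + k * (C : Int) + (C : Int) * s) (get2 eg i (j + (C : Int) * s)))
            ((PySem.List.pyRange 0 s 1).foldl (fun eg k =>
              set2 eg i (j + k * (C : Int)) (get2 eg i (j + (C : Int) * s))) eg)) eg) eg)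
      ((R : Int) * (2 * s + 1)).toNat ((C : Int) * (2 * s + 1)).toNat ∧
    ∀ i j : Int, 0 ≤ i → i < (R : Int) * (2 * s + 1) → 0 ≤ j → j < (C : Int) * (2 * s + 1) →
      get2 ((PySem.List.pyRange 0 ((R : Int) * (2 * s + 1)) 1).foldl (fun eg i =>
        (PySem.List.pyRange 0 (C : Int) 1).foldl (fun eg j =>
          (PySem.List.pyRange 1 (s + 1) 1).foldl (fun eg k =>
            set2 eg i (j + k * (C : Int) + (C : Int) * s) (get2 eg i (j + (C : Int) * s)))
            ((PySem.List.pyRange 0 s 1).foldl (fun eg k =>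
              set2 eg i (j + k * (C : Int)) (get2 eg i (j + (C : Int) * s))) eg)) eg) eg) i j =
      if j < (C : Int) * s ∨ (C : Int) * s + C ≤ j
      then get2 eg i ((j % (C : Int)) + (C : Int) * s) else get2 eg i j := by
  have hC' : (0 : Int) < (C : Int) := by exact_mod_cast hC
  have hRs : (0 : Int) ≤ (R : Int) * s := by positivity
  have hCs : (0 : Int) ≤ (C : Int) * s := by positivity
  have hER : ((((R : Int) * (2 * s + 1)).toNat : Nat) : Int) = (R : Int) * (2 * s + 1) :=
    Int.toNat_of_nonneg (by positivity)
  have hEC : ((((C : Int) * (2 * s + 1)).toNat : Nat) : Int) = (C : Int) * (2 * s + 1) :=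
    Int.toNat_of_nonneg (by positivity)
  have hERv : (R : Int) * (2 * s + 1) = 2 * ((R : Int) * s) + R := by ring
  have hECv : (C : Int) * (2 * s + 1) = 2 * ((C : Int) * s) + C := by ring
  set L3 := (PySem.List.pyRange 0 ((R : Int) * (2 * s + 1)) 1).flatMap (fun i =>
      (PySem.List.pyRange 0 (C : Int) 1).flatMap (fun j =>
        (PySem.List.pyRange 0 s 1).map (fun k =>
          (((i, j + k * (C : Int)) : Int × Int), ((i, j + (C : Int) * s) : Int × Int))) ++
        (PySem.List.pyRange 1 (s + 1) 1).map (fun k =>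
          (((i, j + k * (C : Int) + (C : Int) * s) : Int × Int),
            ((i, j + (C : Int) * s) : Int × Int))))) with hL3
  have hfold : (PySem.List.pyRange 0 ((R : Int) * (2 * s + 1)) 1).foldl (fun eg i =>
        (PySem.List.pyRange 0 (C : Int) 1).foldl (fun eg j =>
          (PySem.List.pyRange 1 (s + 1) 1).foldl (fun eg k =>
            set2 eg i (j + k * (C : Int) + (C : Int) * s) (get2 eg i (j + (C : Int) * s)))
            ((PySem.List.pyRange 0 s 1).foldl (fun eg k =>
              set2 eg i (j + k * (C : Int)) (get2 eg i (j + (C : Int) * s))) eg)) eg) eg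
      = L3.foldl (fun g p => set2 g p.1.1 p.1.2 (get2 g p.2.1 p.2.2)) eg := by
    rw [hL3]
    simp [List.foldl_flatMap, List.foldl_append, List.foldl_map]
  have hmem : ∀ p ∈ L3, ∃ i0 j0 k : Int, 0 ≤ i0 ∧ i0 < (R : Int) * (2 * s + 1) ∧
      0 ≤ j0 ∧ j0 < C ∧
      ((0 ≤ k ∧ k < s ∧ p = ((i0, j0 + k * (C : Int)), (i0, j0 + (C : Int) * s))) ∨
       (1 ≤ k ∧ k < s + 1 ∧
         p = ((i0, j0 + k * (C : Int) + (C : Int) * s), (i0, j0 + (C : Int) * s)))) := by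
    intro p hp
    rw [hL3] at hp
    simp only [List.mem_flatMap, List.mem_append, List.mem_map, PySem.List.mem_pyRange_one] at hp
    obtain ⟨i0, ⟨hi1, hi2⟩, j0, ⟨hj1, hj2⟩, hp⟩ := hp
    rcases hp with ⟨k, ⟨hk1, hk2⟩, rfl⟩ | ⟨k, ⟨hk1, hk2⟩, rfl⟩
    · exact ⟨i0, j0, k, hi1, hi2, hj1, hj2, Or.inl ⟨hk1, hk2, rfl⟩⟩
    · exact ⟨i0, j0, k, hi1, hi2, hj1, hj2, Or.inr ⟨hk1, hk2, rfl⟩⟩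
  -- each read position is determined by the write position
  have hkey : ∀ p ∈ L3, p.2 = ((p.1.1, (p.1.2 % (C : Int)) + (C : Int) * s) : Int × Int) := by
    intro p hp
    obtain ⟨i0, j0, k, h1, h2, h3, h4, hc⟩ := hmem p hp
    rcases hc with ⟨hk1, hk2, rfl⟩ | ⟨hk1, hk2, rfl⟩
    · simp only
      rw [mod_add_mul C j0 k h3 h4]
    · simp only
      rw [show j0 + k * (C : Int) + (C : Int) * s = j0 + (k + s) * (C : Int) from by ring,
        mod_add_mul C j0 (k + s) h3 h4]
  -- write columns lie outside the centre block
  have hout : ∀ p ∈ L3, p.1.2 < (C : Int) * s ∨ (C : Int) * s + C ≤ p.1.2 := by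
    intro p hp
    obtain ⟨i0, j0, k, h1, h2, h3, h4, hc⟩ := hmem p hp
    rcases hc with ⟨hk1, hk2, rfl⟩ | ⟨hk1, hk2, rfl⟩
    · have hkC2 : k * (C : Int) ≤ (s - 1) * (C : Int) :=
        mul_le_mul_of_nonneg_right (by linarith) (by positivity)
      have : (s - 1) * (C : Int) = (C : Int) * s - C := by ring
      exact Or.inl (by simp only; linarith)
    · have hkC2 : (1 : Int) * (C : Int) ≤ k * (C : Int) :=
        mul_le_mul_of_nonneg_right (by linarith) (by positivity)
      exact Or.inr (by simp only; linarith)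
  obtain ⟨hS, hA, hB⟩ := foldl_reads ((R : Int) * (2 * s + 1)).toNat
    ((C : Int) * (2 * s + 1)).toNat L3 eg hshape
    (by
      intro p hp
      obtain ⟨i0, j0, k, h1, h2, h3, h4, hc⟩ := hmem p hp
      rcases hc with ⟨hk1, hk2, rfl⟩ | ⟨hk1, hk2, rfl⟩
      · have hkC1 : 0 ≤ k * (C : Int) := by positivity
        have hkC2 : k * (C : Int) ≤ (s - 1) * (C : Int) :=
          mul_le_mul_of_nonneg_right (by linarith) (by positivity)
        have : (s - 1) * (C : Int) = (C : Int) * s - C := by ring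
        exact ⟨⟨by linarith, by rw [hER]; linarith, by linarith, by rw [hEC]; linarith⟩,
          ⟨by linarith, by rw [hER]; linarith, by linarith, by rw [hEC]; linarith⟩⟩
      · have hkC1 : 0 ≤ k * (C : Int) := by positivity
        have hkC2 : k * (C : Int) ≤ s * (C : Int) :=
          mul_le_mul_of_nonneg_right (by linarith) (by positivity)
        have : s * (C : Int) = (C : Int) * s := by ring
        exact ⟨⟨by linarith, by rw [hER]; linarith, by linarith, by rw [hEC]; linarith⟩,
          ⟨by linarith, by rw [hER]; linarith, by linarith, by rw [hEC]; linarith⟩⟩)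
    (by
      intro p hp q hq
      have h1 := hkey p hp
      have h2 := hout q hq
      intro hcon
      rw [h1] at hcon
      have := congrArg Prod.snd hcon
      simp only at this
      have hm1 : 0 ≤ p.1.2 % (C : Int) := Int.emod_nonneg _ (by omega)
      have hm2 : p.1.2 % (C : Int) < (C : Int) := Int.emod_lt_of_pos _ hC'
      rcases h2 with h | h <;> rw [← this] at h <;> linarith)
    (by
      intro p hp q hq hpq
      rw [hkey p hp, hkey q hq, show p.1.1 = q.1.1 from by rw [hpq],
        show p.1.2 = q.1.2 from by rw [hpq]])
  rw [hfold]
  refine ⟨hS, ?_⟩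
  intro i j hi hi2 hj hj2
  split_ifs with hcond
  · rcases hcond with hlt | hge
    · obtain ⟨j0, k, h1, h2, h3, h4, h5, h6, -⟩ := row_decomp C hC s j hs0 hj hlt
      have hmem' : (((i, j) : Int × Int), ((i, (j % (C : Int)) + (C : Int) * s) : Int × Int))
          ∈ L3 := by
        rw [hL3]
        simp only [List.mem_flatMap, List.mem_append, List.mem_map, PySem.List.mem_pyRange_one]
        refine ⟨i, ⟨hi, hi2⟩, j0, ⟨h1, h2⟩, Or.inl ⟨k, ⟨h3, h4⟩, ?_⟩⟩
        simp only [Prod.mk.injEq]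
        refine ⟨⟨trivial, by linarith⟩, trivial, ?_⟩
        rw [← h6]
      exact hA _ hmem'
    · have hj' : 0 ≤ j - (C : Int) * s := by linarith
      have hj'2 : j - (C : Int) * s < (C : Int) * (s + 1) := by
        have : (C : Int) * (s + 1) = (C : Int) * (2 * s + 1) - (C : Int) * s := by ring
        linarith
      obtain ⟨j0, k, h1, h2, h3, h4, h5, h6, -⟩ :=
        row_decomp C hC (s + 1) (j - (C : Int) * s) (by linarith) hj' hj'2
      have hk1 : 1 ≤ k := by
        by_contra hcon
        have hk0 : k ≤ 0 := by omega
        have : k * (C : Int) ≤ 0 := mul_nonpos_of_nonpos_of_nonneg hk0 (by positivity)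
        linarith
      have hjmod : j % (C : Int) = j0 := by
        rw [show j = j0 + (k + s) * (C : Int) from by linarith [h5]]
        exact mod_add_mul C j0 (k + s) h1 h2
      have hmem' : (((i, j) : Int × Int), ((i, (j % (C : Int)) + (C : Int) * s) : Int × Int))
          ∈ L3 := by
        rw [hL3]
        simp only [List.mem_flatMap, List.mem_append, List.mem_map, PySem.List.mem_pyRange_one]
        refine ⟨i, ⟨hi, hi2⟩, j0, ⟨h1, h2⟩, Or.inr ⟨k, ⟨hk1, h4⟩, ?_⟩⟩
        simp only [Prod.mk.injEq]
        refine ⟨⟨trivial, by linarith⟩, trivial, ?_⟩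
        rw [hjmod]
      exact hA _ hmem'
  · apply hB i j hi hj
    intro p hp
    have h2 := hout p hp
    intro hcon
    rw [hcon] at h2
    simp only at h2
    push Not at hcond
    rcases h2 with h | h <;> linarith [hcond.1, hcond.2]

lemma tiling_eq (g' : List (List String)) (R C : Nat) (s : Int)
    (hR : 0 < R) (hC : 0 < C) (hs0 : 0 ≤ s) :
    ((PySem.List.pyRange 0 ((R : Int) * (2 * s + 1)) 1).foldl (fun eg i =>
        (PySem.List.pyRange 0 (C : Int) 1).foldl (fun eg j =>
          (PySem.List.pyRange 1 (s + 1) 1).foldl (fun eg k =>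
            set2 eg i (j + k * (C : Int) + (C : Int) * s) (get2 eg i (j + (C : Int) * s)))
            ((PySem.List.pyRange 0 s 1).foldl (fun eg k =>
              set2 eg i (j + k * (C : Int)) (get2 eg i (j + (C : Int) * s))) eg)) eg)
      ((PySem.List.pyRange 0 (R : Int) 1).foldl (fun eg i =>
        (PySem.List.pyRange 0 (C : Int) 1).foldl (fun eg j =>
          (PySem.List.pyRange 1 (s + 1) 1).foldl (fun eg k =>
            set2 eg (i + k * (R : Int) + (R : Int) * s) (j + (C : Int) * s) (get2 g' i j))
            ((PySem.List.pyRange 0 s 1).foldl (fun eg k =>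
              set2 eg (i + k * (R : Int)) (j + (C : Int) * s) (get2 g' i j)) eg)) eg)
        ((PySem.List.pyRange 0 (R : Int) 1).foldl (fun eg i =>
          (PySem.List.pyRange 0 (C : Int) 1).foldl (fun eg j =>
            set2 eg (i + (R : Int) * s) (j + (C : Int) * s) (get2 g' i j)) eg)
          ((PySem.List.pyRange 0 ((R : Int) * (2 * s + 1)) 1).map (fun _ =>
            (PySem.List.pyRange 0 ((C : Int) * (2 * s + 1)) 1).map (fun _ => "."))))))
    = (PySem.List.pyRange 0 ((R : Int) * (2 * s + 1)) 1).map (fun i =>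
        (PySem.List.pyRange 0 ((C : Int) * (2 * s + 1)) 1).map (fun j =>
          get2 g' (PySem.Int.mod i (R : Int)) (PySem.Int.mod j (C : Int)))) := by
  have hR' : (0 : Int) < (R : Int) := by exact_mod_cast hR
  have hC' : (0 : Int) < (C : Int) := by exact_mod_cast hC
  have hRs : (0 : Int) ≤ (R : Int) * s := by positivity
  have hCs : (0 : Int) ≤ (C : Int) * s := by positivity
  have hER : ((((R : Int) * (2 * s + 1)).toNat : Nat) : Int) = (R : Int) * (2 * s + 1) :=
    Int.toNat_of_nonneg (by positivity)
  have hEC : ((((C : Int) * (2 * s + 1)).toNat : Nat) : Int) = (C : Int) * (2 * s + 1) :=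
    Int.toNat_of_nonneg (by positivity)
  have hERv : (R : Int) * (2 * s + 1) = 2 * ((R : Int) * s) + R := by ring
  have hECv : (C : Int) * (2 * s + 1) = 2 * ((C : Int) * s) + C := by ring
  have h0S : Shape ((PySem.List.pyRange 0 ((R : Int) * (2 * s + 1)) 1).map (fun _ =>
      (PySem.List.pyRange 0 ((C : Int) * (2 * s + 1)) 1).map (fun _ => ".")))
      ((R : Int) * (2 * s + 1)).toNat ((C : Int) * (2 * s + 1)).toNat :=
    shape_map_grid (fun _ _ => ".") _ _
  obtain ⟨h1S, h1get⟩ := pass1_spec g' _ R C s hR hC hs0 h0S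
  obtain ⟨h2S, h2get⟩ := pass2_spec g' _ R C s hR hC hs0 h1S
  obtain ⟨h3S, h3get⟩ := pass3_spec _ R C s hR hC hs0 h2S
  have hBS : Shape ((PySem.List.pyRange 0 ((R : Int) * (2 * s + 1)) 1).map (fun i =>
      (PySem.List.pyRange 0 ((C : Int) * (2 * s + 1)) 1).map (fun j =>
        get2 g' (PySem.Int.mod i (R : Int)) (PySem.Int.mod j (C : Int)))))
      ((R : Int) * (2 * s + 1)).toNat ((C : Int) * (2 * s + 1)).toNat :=
    shape_map_grid (fun i j => get2 g' (PySem.Int.mod i (R : Int)) (PySem.Int.mod j (C : Int))) _ _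
  apply grid_ext _ _ ((R : Int) * (2 * s + 1)).toNat ((C : Int) * (2 * s + 1)).toNat h3S hBS
  intro i j hi hi2 hj hj2
  rw [hER] at hi2
  rw [hEC] at hj2
  -- the centre column block of the grid after pass 2 holds the vertically tiled grid
  have hcenter : ∀ c : Int, (C : Int) * s ≤ c → c < (C : Int) * s + C →
      get2 ((PySem.List.pyRange 0 (R : Int) 1).foldl (fun eg i =>
        (PySem.List.pyRange 0 (C : Int) 1).foldl (fun eg j =>
          (PySem.List.pyRange 1 (s + 1) 1).foldl (fun eg k =>
            set2 eg (i + k * (R : Int) + (R : Int) * s) (j + (C : Int) * s) (get2 g' i j))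
            ((PySem.List.pyRange 0 s 1).foldl (fun eg k =>
              set2 eg (i + k * (R : Int)) (j + (C : Int) * s) (get2 g' i j)) eg)) eg)
        ((PySem.List.pyRange 0 (R : Int) 1).foldl (fun eg i =>
          (PySem.List.pyRange 0 (C : Int) 1).foldl (fun eg j =>
            set2 eg (i + (R : Int) * s) (j + (C : Int) * s) (get2 g' i j)) eg)
          ((PySem.List.pyRange 0 ((R : Int) * (2 * s + 1)) 1).map (fun _ =>
            (PySem.List.pyRange 0 ((C : Int) * (2 * s + 1)) 1).map (fun _ => "."))))) i c
      = get2 g' (i % (R : Int)) (c - (C : Int) * s) := by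
    intro c hc1 hc2
    rw [h2get i c hi hi2 (by linarith)]
    by_cases hic : i < (R : Int) * s ∨ (R : Int) * s + R ≤ i
    · rw [if_pos ⟨⟨hc1, hc2⟩, hic⟩]
    · rw [if_neg (by tauto)]
      push Not at hic
      rw [h1get i c hi (by linarith)]
      rw [if_pos ⟨hic.1, by linarith [hic.2], hc1, hc2⟩]
      have : i % (R : Int) = i - (R : Int) * s := by
        rw [show i = (i - (R : Int) * s) + s * (R : Int) from by ring]
        rw [mod_add_mul R (i - (R : Int) * s) s (by linarith [hic.1]) (by linarith [hic.2])]
        ring_nf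
      rw [this]
  have hBget := get2_map_grid (fun i j =>
      get2 g' (PySem.Int.mod i (R : Int)) (PySem.Int.mod j (C : Int)))
      ((R : Int) * (2 * s + 1)) ((C : Int) * (2 * s + 1)) i j hi hi2 hj hj2
  rw [hBget]
  beta_reduce
  rw [h3get i j hi hi2 hj hj2]
  rw [PySem.Int.mod_eq_emod_of_pos hR', PySem.Int.mod_eq_emod_of_pos hC']
  have hjm1 : 0 ≤ j % (C : Int) := Int.emod_nonneg _ (by omega)
  have hjm2 : j % (C : Int) < (C : Int) := Int.emod_lt_of_pos _ hC'
  split_ifs with hcond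
  · rw [hcenter (j % (C : Int) + (C : Int) * s) (by linarith) (by linarith)]
    congr 1
    ring
  · push Not at hcond
    rw [hcenter j (by linarith [hcond.1]) (by linarith [hcond.2])]
    congr 1
    rw [show j = (j - (C : Int) * s) + s * (C : Int) from by ring]
    rw [mod_add_mul C (j - (C : Int) * s) s (by linarith [hcond.1]) (by linarith [hcond.2])]
    ring_nf

theorem final_eq (grid : List (List String)) (steps : Int)
    (hs0 : 0 ≤ steps) (hr0 : 0 < grid.length) (hc0 : 0 < (grid.headD []).length) :
    extend_grid_replace_s grid steps = extend_grid_replace_s_alt grid steps := by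
  simp only [extend_grid_replace_s, extend_grid_replace_s_alt]
  rw [tiling_eq (set2 grid ((pyFindS grid).getD (0, 0)).1 ((pyFindS grid).getD (0, 0)).2 ".")
    grid.length (grid.headD []).length steps hr0 hc0 hs0]


-- ===== VERDICT (by name: the statement is the Claim_ definition above) =====
theorem extend_grid_replace_s_spec : Claim_equal_extend_grid_replace_s := by
  intro grid steps _hdom hpre
  obtain ⟨hs0, hc0, -, row, hrow, -⟩ := hpre
  have hr0 : 0 < grid.length := List.length_pos_of_mem hrow
  exact final_eq grid steps hs0 hr0 hc0
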